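-- pv_equiv track=rewrite | github.com/seub/LagrangeSeries | markov-generatetriples.py | checkMUC
-- ===== SOURCE A (Python) =====
-- def vietaTop(triple) :
-- 	return [triple[0], triple[2], 3*triple[0]*triple[2]-triple[1]]
--
-- def vietaBottom(triple) :
-- 	return [triple[1],triple[2],3*triple[1]*triple[2]-triple[0]]
--
-- def generateMarkovRec(triple, prevList, upperBound) :
--
-- 	if triple[2] < upperBound :
-- 		prevList.append(triple)
-- 		generateMarkovRec(vietaTop(triple), prevList, upperBound)
-- 		generateMarkovRec(vietaBottom(triple), prevList, upperBound)
-- 	else: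
-- 		return triple
--
-- def removeDuplicates(inputList):
-- 	res = []
-- 	last = object()
-- 	for x in inputList :
-- 		if x == last:
-- 			continue
-- 		res.append(x)
-- 		last = x
-- 	return res
--
-- def generateMarkov(upperBound):
-- 	res = []
-- 	generateMarkovRec([1,1,1], res, upperBound)
-- 	res = sorted(res, key=lambda x: x[2])
-- 	return removeDuplicates(res)
--
-- def checkMUC(upperBound):
-- 	markovList = generateMarkov(upperBound)
-- 	L = len(markovList)
-- 	res = True;
-- 	i=0;
-- 	last = [0,0,0]
-- 	while (res and i<L):
-- 		triple = markovList[i];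
-- 		res = (triple[2] != last[2])
-- 		last = triple
-- 		i += 1
-- 	return res
-- ===== SOURCE B (Python) =====
-- def checkMUC(upperBound):
--     triples = set()
--
--     def explore(t):
--         if t[2] < upperBound:
--             triples.add(t)
--             explore((t[0], t[2], 3 * t[0] * t[2] - t[1]))
--             explore((t[1], t[2], 3 * t[1] * t[2] - t[0]))
--
--     explore((1, 1, 1))
--     return len({t[2] for t in triples}) == len(triples)
-- ===== Notes on version B (the rewrite author's own statement) =====
-- stated objective: simpler
-- what changed: B keeps the Vieta-tree DFS but collects the triples into a set and returns len({third coordinates}) == len(set of triples), replacing A's list-append, sort-by-third-coordinate, adjacent-dedup and sequential scan pipeline with a direct hash-set distinctness check.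
import Mathlib
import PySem

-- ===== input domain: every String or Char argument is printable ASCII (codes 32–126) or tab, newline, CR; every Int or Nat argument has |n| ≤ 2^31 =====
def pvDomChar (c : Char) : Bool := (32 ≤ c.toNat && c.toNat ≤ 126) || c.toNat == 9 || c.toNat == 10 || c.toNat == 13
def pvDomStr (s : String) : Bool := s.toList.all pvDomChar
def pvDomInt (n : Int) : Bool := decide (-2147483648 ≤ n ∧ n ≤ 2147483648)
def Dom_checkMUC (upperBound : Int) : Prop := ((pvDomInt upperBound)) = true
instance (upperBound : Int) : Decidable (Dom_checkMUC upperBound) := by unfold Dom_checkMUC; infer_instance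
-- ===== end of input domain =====

-- B keeps the Vieta-tree DFS but collects the triples into a set and compares the number of distinct
-- third coordinates with the number of distinct triples, replacing A's sort + adjacent-dedup + scan
-- pipeline (objective: simpler).

-- ===== PORT A =====
def vietaTopA (t : Int × Int × Int) : Int × Int × Int := (t.1, t.2.2, 3 * t.1 * t.2.2 - t.2.1)

def vietaBottomA (t : Int × Int × Int) : Int × Int × Int := (t.2.1, t.2.2, 3 * t.2.1 * t.2.2 - t.1)

-- fuel only makes the recursion total; the tree has depth ≤ 33 for every |upperBound| ≤ 2^31,
-- so with fuel 100 the port computes exactly what the Python recursion computes on Dom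
def generateMarkovRec (fuel : Nat) (t : Int × Int × Int) (prevList : List (Int × Int × Int)) (u : Int) : List (Int × Int × Int) :=
  match fuel with
  | 0 => prevList
  | f + 1 =>
    if t.2.2 < u then
      generateMarkovRec f (vietaBottomA t) (generateMarkovRec f (vietaTopA t) (prevList ++ [t]) u) u
    else prevList

-- the for-loop of removeDuplicates, carrying (res, last); last = none plays Python's fresh `object()` sentinel
def removeDupGo (l res : List (Int × Int × Int)) (last : Option (Int × Int × Int)) : List (Int × Int × Int) :=
  match l with
  | [] => res
  | x :: rest => if some x == last then removeDupGo rest res last else removeDupGo rest (res ++ [x]) (some x)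

def removeDuplicatesA (l : List (Int × Int × Int)) : List (Int × Int × Int) := removeDupGo l [] none

def generateMarkov (u : Int) : List (Int × Int × Int) :=
  removeDuplicatesA (PySem.List.sorted (generateMarkovRec 100 (1, 1, 1) [] u) (fun x => x.2.2) false)

-- the while loop of checkMUC over the remaining list, carrying last
def checkLoop (l : List (Int × Int × Int)) (last : Int × Int × Int) : Bool :=
  match l with
  | [] => true
  | t :: rest => if t.2.2 != last.2.2 then checkLoop rest t else false

def checkMUC (upperBound : Int) : Bool := checkLoop (generateMarkov upperBound) (0, 0, 0)

-- ===== PORT B =====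
-- same fuel-totalised DFS, accumulating a set instead of a list
def exploreB (fuel : Nat) (t : Int × Int × Int) (s : PySem.Set (Int × Int × Int)) (u : Int) : PySem.Set (Int × Int × Int) :=
  match fuel with
  | 0 => s
  | f + 1 =>
    if t.2.2 < u then
      exploreB f (t.2.1, t.2.2, 3 * t.2.1 * t.2.2 - t.1)
        (exploreB f (t.1, t.2.2, 3 * t.1 * t.2.2 - t.2.1) (PySem.Set.add s t) u) u
    else s

def checkMUC_alt (upperBound : Int) : Bool :=
  let triples := exploreB 100 (1, 1, 1) PySem.Set.empty upperBound
  PySem.Set.len (PySem.Set.ofList (triples.map (fun t => t.2.2))) == PySem.Set.len triples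

-- ===== PRECONDITION & SPEC =====
def Spec_checkMUC (upperBound : Int) (out : Bool) : Prop := out = checkMUC_alt upperBound
instance (upperBound : Int) (out : Bool) : Decidable (Spec_checkMUC upperBound out) := by unfold Spec_checkMUC; infer_instance

-- ===== CLAIM (what is proved, stated in full; the proofs are below) =====
def Claim_equal_checkMUC : Prop := ∀ (upperBound : Int), Dom_checkMUC upperBound → Spec_checkMUC upperBound (checkMUC upperBound)

-- ===== LEMMAS AND PROOFS =====

-- B's DFS over a set is A's DFS over a list, up to Set.ofList
theorem gen_eq_set : ∀ (f : Nat) (t : Int × Int × Int) (acc : List (Int × Int × Int)) (u : Int),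
    exploreB f t (PySem.Set.ofList acc) u = PySem.Set.ofList (generateMarkovRec f t acc u) := by
  intro f
  induction f with
  | zero => intro t acc u; rfl
  | succ f ih =>
    intro t acc u
    simp only [exploreB, generateMarkovRec, vietaTopA, vietaBottomA]
    by_cases h : t.2.2 < u
    · simp only [if_pos h, ← PySem.Set.ofList_append_singleton, ih]
    · simp [if_neg h]

-- every generated triple has third coordinate ≥ 1
theorem gen_z_pos : ∀ (f : Nat) (t : Int × Int × Int) (acc : List (Int × Int × Int)) (u : Int),
    1 ≤ t.1 → 1 ≤ t.2.1 → t.1 ≤ t.2.2 → t.2.1 ≤ t.2.2 →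
    (∀ s ∈ acc, 1 ≤ s.2.2) → ∀ s ∈ generateMarkovRec f t acc u, 1 ≤ s.2.2 := by
  intro f
  induction f with
  | zero => intro t acc u _ _ _ _ hacc; exact hacc
  | succ f ih =>
    intro t acc u hx hy hxz hyz hacc
    simp only [generateMarkovRec]
    by_cases h : t.2.2 < u
    · simp only [if_pos h]
      apply ih <;> try simp only [vietaBottomA]
      · exact hy
      · nlinarith
      · nlinarith
      · nlinarith
      · apply ih <;> try simp only [vietaTopA]
        · exact hx
        · nlinarith
        · nlinarith
        · nlinarith
        · intro s hs
          rcases List.mem_append.mp hs with h' | h'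
          · exact hacc s h'
          · simp at h'; subst h'; linarith
    · simp only [if_neg h]; exact hacc

theorem removeDupGo_destutter' : ∀ (l res : List (Int × Int × Int)) (a : Int × Int × Int),
    removeDupGo l (res ++ [a]) (some a) = res ++ List.destutter' (· ≠ ·) a l := by
  intro l
  induction l with
  | nil => intro res a; simp [removeDupGo, List.destutter'_nil]
  | cons x rest ih =>
    intro res a
    simp only [removeDupGo, List.destutter'_cons]
    by_cases h : x = a
    · subst h
      simp only [beq_iff_eq, ne_eq, not_true_eq_false, if_false]
      exact ih res x
    · have : (some x == some a) = false := by simp [h]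
      rw [this]
      simp only [Bool.false_eq_true, if_false, ne_eq]
      rw [if_pos (Ne.symm h)]
      have := ih (res ++ [a]) x
      simpa using this

theorem removeDup_eq_destutter (l : List (Int × Int × Int)) :
    removeDuplicatesA l = l.destutter (· ≠ ·) := by
  cases l with
  | nil => rfl
  | cons x rest =>
    unfold removeDuplicatesA
    simp only [removeDupGo, List.destutter_cons']
    have h : (some x == (none : Option (Int × Int × Int))) = false := rfl
    rw [h]
    simp only [Bool.false_eq_true, if_false]
    have := removeDupGo_destutter' rest [] x
    simpa using this

theorem checkLoop_iff : ∀ (l : List (Int × Int × Int)) (last : Int × Int × Int),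
    checkLoop l last = true ↔ List.IsChain (fun a b => a.2.2 ≠ b.2.2) (last :: l) := by
  intro l
  induction l with
  | nil => intro last; simp [checkLoop]
  | cons t rest ih =>
    intro last
    rw [List.isChain_cons_cons]
    simp only [checkLoop]
    by_cases h : t.2.2 = last.2.2
    · simp [h, bne]
    · have hb : (t.2.2 != last.2.2) = true := by simp [bne, h]
      rw [hb, if_pos rfl, ih t]
      simp only [ne_eq]
      tauto

theorem mem_destutter'_ne : ∀ (l : List (Int × Int × Int)) (a x : Int × Int × Int),
    x ∈ a :: l → x ∈ l.destutter' (· ≠ ·) a := by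
  intro l
  induction l with
  | nil => intro a x hx; simpa [List.destutter'_nil] using hx
  | cons b rest ih =>
    intro a x hx
    rw [List.destutter'_cons]
    by_cases h : a ≠ b
    · rw [if_pos h]
      rcases List.mem_cons.mp hx with rfl | hx'
      · exact List.mem_cons_self
      · exact List.mem_cons_of_mem _ (ih b x hx')
    · rw [if_neg h]
      have hab : a = b := by tauto
      apply ih a x
      rcases List.mem_cons.mp hx with rfl | hx'
      · exact List.mem_cons_self
      · rcases List.mem_cons.mp hx' with rfl | hx''
        · rw [hab]; exact List.mem_cons_self
        · exact List.mem_cons_of_mem _ hx''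

theorem mem_destutter_ne (l : List (Int × Int × Int)) (x : Int × Int × Int) (hx : x ∈ l) :
    x ∈ l.destutter (· ≠ ·) := by
  cases l with
  | nil => simp at hx
  | cons a rest => rw [List.destutter_cons']; exact mem_destutter'_ne rest a x hx

theorem ofList_length_toFinset (M : List (Int × Int × Int)) :
    (PySem.Set.ofList M).length = M.toFinset.card := by
  rw [← List.toFinset_card_of_nodup (PySem.Set.nodup_ofList M)]
  congr 1
  ext x
  simp [PySem.Set.mem_ofList]

theorem ofList_length_toFinset_int (M : List Int) :
    (PySem.Set.ofList M).length = M.toFinset.card := by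
  rw [← List.toFinset_card_of_nodup (PySem.Set.nodup_ofList M)]
  congr 1
  ext x
  simp [PySem.Set.mem_ofList]

theorem chain_lt_of_chain_ne (l : List (Int × Int × Int))
    (hne : l.IsChain (fun a b => a.2.2 ≠ b.2.2))
    (hle : l.Pairwise (fun a b => a.2.2 ≤ b.2.2)) :
    l.IsChain (fun a b => a.2.2 < b.2.2) := by
  induction l with
  | nil => exact List.isChain_nil
  | cons a rest ih =>
    cases rest with
    | nil => exact List.isChain_singleton a
    | cons b rest' =>
      rw [List.isChain_cons_cons] at hne ⊢
      have hab : a.2.2 ≤ b.2.2 := List.rel_of_pairwise_cons hle List.mem_cons_self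
      exact ⟨lt_of_le_of_ne hab hne.1, ih hne.2 (List.Pairwise.sublist (List.sublist_cons_self _ _) hle)⟩

-- the generic pipeline fact: A's sort + adjacent-dedup + scan equals B's distinctness count
theorem pipeline (L : List (Int × Int × Int)) (hz : ∀ s ∈ L, 1 ≤ s.2.2) :
    checkLoop (removeDuplicatesA (PySem.List.sorted L (fun x => x.2.2) false)) (0, 0, 0)
      = (PySem.Set.len (PySem.Set.ofList ((PySem.Set.ofList L).map (fun t => t.2.2)))
          == PySem.Set.len (PySem.Set.ofList L)) := by
  have hperm : (PySem.List.sorted L (fun x => x.2.2) false).Perm L := PySem.List.sorted_perm L _ false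
  set S := PySem.List.sorted L (fun x => x.2.2) false with hSdef
  set D := S.destutter (· ≠ ·) with hDdef
  have hpair : S.Pairwise (fun a b => a.2.2 ≤ b.2.2) := PySem.List.sorted_pairwise L _
  have hDsub : List.Sublist D S := List.destutter_sublist (R := (· ≠ ·)) S
  have hDchain : D.IsChain (· ≠ ·) := List.isChain_destutter (R := (· ≠ ·)) S
  have hmemDL : ∀ x, x ∈ D ↔ x ∈ L := by
    intro x
    constructor
    · intro h; exact hperm.mem_iff.mp (hDsub.subset h)
    · intro h; exact mem_destutter_ne S x (hperm.mem_iff.mpr h)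
  have hRHS : ((PySem.Set.len (PySem.Set.ofList ((PySem.Set.ofList L).map (fun t => t.2.2)))
      == PySem.Set.len (PySem.Set.ofList L)) = true)
      ↔ Set.InjOn (fun t : Int × Int × Int => t.2.2) (L.toFinset : Set (Int × Int × Int)) := by
    have h1 : ((PySem.Set.ofList L).map (fun t : Int × Int × Int => t.2.2)).toFinset
        = L.toFinset.image (fun t => t.2.2) := by
      ext x; simp [PySem.Set.mem_ofList]
    simp only [PySem.Set.len, beq_iff_eq, Int.natCast_inj]
    rw [ofList_length_toFinset_int, ofList_length_toFinset, h1]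
    exact Finset.card_image_iff
  have hLHS : (checkLoop (removeDuplicatesA S) (0, 0, 0) = true)
      ↔ List.IsChain (fun a b => a.2.2 ≠ b.2.2) ((0, 0, 0) :: D) := by
    rw [removeDup_eq_destutter, ← hDdef]
    exact checkLoop_iff D (0, 0, 0)
  have main : List.IsChain (fun a b => a.2.2 ≠ b.2.2) (((0 : Int), (0 : Int), (0 : Int)) :: D)
      ↔ Set.InjOn (fun t : Int × Int × Int => t.2.2) (L.toFinset : Set (Int × Int × Int)) := by
    constructor
    · intro hc
      have hcD : D.IsChain (fun a b => a.2.2 ≠ b.2.2) := hc.tail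
      have hpairD : D.Pairwise (fun a b => a.2.2 ≤ b.2.2) := hpair.sublist hDsub
      have hlt : D.IsChain (fun a b => a.2.2 < b.2.2) := chain_lt_of_chain_ne D hcD hpairD
      have hltm : (D.map (fun t => t.2.2)).IsChain (· < ·) := (List.isChain_map _).mpr hlt
      have hpm : (D.map (fun t => t.2.2)).Pairwise (· < ·) := List.isChain_iff_pairwise.mp hltm
      have hplt : D.Pairwise (fun a b => a.2.2 < b.2.2) := List.pairwise_map.mp hpm
      have hpne : D.Pairwise (fun a b : Int × Int × Int => a.2.2 ≠ b.2.2) :=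
        hplt.imp (fun h => ne_of_lt h)
      have hforall := List.Pairwise.forall (fun _ _ h => Ne.symm h) hpne
      intro a ha b hb hzeq
      by_contra hne
      exact hforall ((hmemDL a).mpr (by simpa using ha)) ((hmemDL b).mpr (by simpa using hb)) hne hzeq
    · intro hinj
      have hDne : D.IsChain (fun a b => a.2.2 ≠ b.2.2) := by
        apply hDchain.imp_of_mem_imp
        intro a b ha hb hne heq
        exact hne (hinj (by simpa using (hmemDL a).mp ha) (by simpa using (hmemDL b).mp hb) heq)
      cases hDeq : D with
      | nil => exact List.isChain_singleton _
      | cons d rest =>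
        rw [List.isChain_cons_cons]
        refine ⟨?_, hDeq ▸ hDne⟩
        have hd : d ∈ D := by rw [hDeq]; exact List.mem_cons_self
        have h1 : (1 : Int) ≤ d.2.2 := hz d ((hmemDL d).mp hd)
        exact fun h => by simp only [] at h; omega
  have hfin := hLHS.trans (main.trans hRHS.symm)
  have hext : ∀ (x y : Bool), (x = true ↔ y = true) → x = y := by decide
  exact hext _ _ hfin

-- ===== VERDICT (by name: the statement is the Claim_ definition above) =====
theorem checkMUC_spec : Claim_equal_checkMUC := by
  intro u _
  unfold Spec_checkMUC checkMUC checkMUC_alt generateMarkov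
  have h1 : exploreB 100 (1, 1, 1) PySem.Set.empty u
      = PySem.Set.ofList (generateMarkovRec 100 (1, 1, 1) [] u) := gen_eq_set 100 (1, 1, 1) [] u
  have h2 : ∀ s ∈ generateMarkovRec 100 (1, 1, 1) [] u, 1 ≤ s.2.2 := by
    apply gen_z_pos <;> simp
  rw [pipeline _ h2, h1]
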